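-- pv_equiv track=rewrite | github.com/icrayix/adventofcode-24 | Day-12/python/paul2708/day12.py | compute_perimeter
-- ===== SOURCE A (Python) =====
-- from typing import Tuple, List, Set
--
-- def compute_perimeter(blocks: List[Tuple[int, int]]) -> int:
--     perimeter = 4 * len(blocks)
--     for x, y in blocks:
--         for i, j in blocks:
--             if x == i and y == j:
--                 continue
--
--             if x == i and abs(y - j) == 1 or y == j and abs(x - i) == 1:
--                 perimeter -= 1
--
--     return perimeter
-- ===== SOURCE B (Python) =====
-- def compute_perimeter(blocks):
--     cnt = {}
--     for b in blocks:
--         cnt[b] = cnt.get(b, 0) + 1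
--     perimeter = 4 * len(blocks)
--     for x, y in blocks:
--         for n in ((x + 1, y), (x - 1, y), (x, y + 1), (x, y - 1)):
--             perimeter -= cnt.get(n, 0)
--     return perimeter
-- ===== Notes on version B (the rewrite author's own statement) =====
-- stated objective: faster
-- what changed: Replaces the all-pairs O(n^2) adjacency scan with a hash counter built once, then one pass that subtracts the multiplicity of each cell's four neighbours.
import Mathlib
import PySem

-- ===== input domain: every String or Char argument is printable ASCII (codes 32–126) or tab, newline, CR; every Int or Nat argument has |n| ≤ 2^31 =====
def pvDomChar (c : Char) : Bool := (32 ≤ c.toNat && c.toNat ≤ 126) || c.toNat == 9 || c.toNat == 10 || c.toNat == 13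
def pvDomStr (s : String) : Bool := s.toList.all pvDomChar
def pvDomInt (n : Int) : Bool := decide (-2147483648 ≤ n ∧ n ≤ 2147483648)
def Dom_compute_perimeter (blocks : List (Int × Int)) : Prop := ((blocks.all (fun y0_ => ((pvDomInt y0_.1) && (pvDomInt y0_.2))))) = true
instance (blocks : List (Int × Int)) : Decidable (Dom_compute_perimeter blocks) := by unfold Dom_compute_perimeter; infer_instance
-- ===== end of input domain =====

-- B replaces A's all-pairs O(n^2) adjacency scan with a counter built once plus one pass
-- over the four neighbours of each cell (objective: faster, asymptotic).


-- ===== PORT A =====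
def compute_perimeter (blocks : List (Int × Int)) : Int :=
  blocks.foldl (fun per p =>
    blocks.foldl (fun per q =>
      if p.1 = q.1 ∧ p.2 = q.2 then per
      else if (p.1 = q.1 ∧ (p.2 - q.2).natAbs = 1) ∨ (p.2 = q.2 ∧ (p.1 - q.1).natAbs = 1)
        then per - 1 else per) per)
    (4 * (blocks.length : Int))

-- ===== PORT B =====
def compute_perimeter_alt (blocks : List (Int × Int)) : Int :=
  let cnt : PySem.Dict (Int × Int) Int :=
    blocks.foldl (fun d b => d.insert b (d.getD b 0 + 1)) PySem.Dict.empty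
  blocks.foldl (fun per p =>
    [(p.1 + 1, p.2), (p.1 - 1, p.2), (p.1, p.2 + 1), (p.1, p.2 - 1)].foldl
      (fun per n => per - cnt.getD n 0) per)
    (4 * (blocks.length : Int))

-- ===== PRECONDITION & SPEC =====
def Spec_compute_perimeter (blocks : List (Int × Int)) (out : Int) : Prop := out = compute_perimeter_alt blocks
instance (blocks : List (Int × Int)) (out : Int) : Decidable (Spec_compute_perimeter blocks out) := by unfold Spec_compute_perimeter; infer_instance

-- ===== CLAIM (what is proved, stated in full; the proofs are below) =====
def Claim_equal_compute_perimeter : Prop := ∀ (blocks : List (Int × Int)), Dom_compute_perimeter blocks → Spec_compute_perimeter blocks (compute_perimeter blocks)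

-- ===== LEMMAS AND PROOFS =====

-- A's inner scan over the whole list subtracts exactly the multiplicities of p's four neighbours.
theorem pv_innerA (blocks : List (Int × Int)) (p : Int × Int) : ∀ per : Int,
    blocks.foldl (fun per q =>
      if p.1 = q.1 ∧ p.2 = q.2 then per
      else if (p.1 = q.1 ∧ (p.2 - q.2).natAbs = 1) ∨ (p.2 = q.2 ∧ (p.1 - q.1).natAbs = 1)
        then per - 1 else per) per
    = per - ((blocks.count (p.1 + 1, p.2) + blocks.count (p.1 - 1, p.2)
            + blocks.count (p.1, p.2 + 1) + blocks.count (p.1, p.2 - 1) : Nat) : Int) := by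
  induction blocks with
  | nil => intro per; simp
  | cons q l ih =>
    intro per
    simp only [List.foldl_cons, List.count_cons, ih]
    rcases p with ⟨x, y⟩; rcases q with ⟨i, j⟩
    simp only [Prod.mk.injEq, beq_iff_eq]
    split_ifs <;> omega

theorem pv_counter (blocks : List (Int × Int)) (n : Int × Int) :
    (blocks.foldl (fun d b => d.insert b (d.getD b 0 + 1))
      (PySem.Dict.empty : PySem.Dict (Int × Int) Int)).getD n 0 = (blocks.count n : Int) := by
  rw [PySem.Dict.foldl_insert_getD_add_one_eq_counter, PySem.Dict.getD_counter]

-- ===== VERDICT (by name: the statement is the Claim_ definition above) =====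
theorem compute_perimeter_spec : Claim_equal_compute_perimeter := by
  intro blocks _
  unfold Spec_compute_perimeter compute_perimeter compute_perimeter_alt
  have hf : (fun per (p : Int × Int) =>
      blocks.foldl (fun per q =>
        if p.1 = q.1 ∧ p.2 = q.2 then per
        else if (p.1 = q.1 ∧ (p.2 - q.2).natAbs = 1) ∨ (p.2 = q.2 ∧ (p.1 - q.1).natAbs = 1)
          then per - 1 else per) per)
    = (fun per (p : Int × Int) =>
      [(p.1 + 1, p.2), (p.1 - 1, p.2), (p.1, p.2 + 1), (p.1, p.2 - 1)].foldl
        (fun per n => per - (blocks.foldl (fun d b => d.insert b (d.getD b 0 + 1))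
          (PySem.Dict.empty : PySem.Dict (Int × Int) Int)).getD n 0) per) := by
    funext per p
    rw [pv_innerA]
    simp only [List.foldl_cons, List.foldl_nil, pv_counter]
    push_cast
    ring
  rw [hf]
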